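-- pv_equiv track=rewrite | github.com/oorellana95/hackerrank-python | codility_/digram.py | solution
-- ===== SOURCE A (Python) =====
-- def solution(S: str):
--     major_distance = 0
--     for i in range(len(S)-1):
--         digram = S[i] + S[i+1]
--         last_occurrence = S.rindex(digram)
--         distance = last_occurrence - i
--         if major_distance < distance:
--             major_distance = distance
--     return -1 if major_distance == 0 else major_distance
-- ===== SOURCE B (Python) =====
-- def solution(S: str):
--     first = {}
--     best = 0
--     for i in range(len(S) - 1):
--         j = first.setdefault(S[i:i+2], i)
--         if i - j > best:
--             best = i - j
--     return -1 if best == 0 else best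
-- ===== Notes on version B (the rewrite author's own statement) =====
-- stated objective: faster
-- what changed: Instead of calling S.rindex on each digram (a backward substring scan per position, quadratic in the worst case), B makes a single forward pass storing the first index of each digram in a dict and keeps a running maximum of i - first[digram], which yields the same maximal span.
import Mathlib
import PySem

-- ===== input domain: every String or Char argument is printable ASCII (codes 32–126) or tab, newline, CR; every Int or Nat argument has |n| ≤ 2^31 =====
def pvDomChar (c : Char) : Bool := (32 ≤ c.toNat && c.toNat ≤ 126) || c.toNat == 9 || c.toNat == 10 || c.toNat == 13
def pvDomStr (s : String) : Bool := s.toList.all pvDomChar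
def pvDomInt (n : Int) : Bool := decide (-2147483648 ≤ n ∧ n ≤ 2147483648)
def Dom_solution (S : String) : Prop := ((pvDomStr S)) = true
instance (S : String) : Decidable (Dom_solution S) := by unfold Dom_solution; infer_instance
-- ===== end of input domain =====

-- B replaces A's per-position backward substring scan (rindex) by one forward pass with a dict of
-- first occurrences and a running maximum of i - first[digram]; same return value on every input.

-- ===== PORT A =====
-- Inside the loop i and i+1 are always in range (so pyGetD's default is never used), and the digram
-- occurs at i, so S.rindex never raises and equals Chars.rfind on every reached call.
def solution (S : String) : Int :=
  let cs := S.toList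
  let major := (PySem.List.pyRange 0 ((cs.length : Int) - 1)).foldl
    (fun major i =>
      let digram := [PySem.List.pyGetD cs i ' ', PySem.List.pyGetD cs (i + 1) ' ']
      let lastOccurrence := PySem.Chars.rfind cs digram
      let distance := lastOccurrence - i
      if major < distance then distance else major) 0
  if major = 0 then -1 else major

-- ===== PORT B =====
-- the loop body of Source B (d = S[i:i+2]; j = first.setdefault(d, i); best update), as a named step
def altStep (cs : List Char) (st : PySem.Dict (List Char) Int × Int) (i : Int) :
    PySem.Dict (List Char) Int × Int :=
  let d := PySem.List.slice cs (some i) (some (i + 2))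
  let j := (st.1.get? d).getD i
  (st.1.setdefault d i, if i - j > st.2 then i - j else st.2)

def solution_alt (S : String) : Int :=
  let cs := S.toList
  let res := (PySem.List.pyRange 0 ((cs.length : Int) - 1)).foldl (altStep cs) (PySem.Dict.empty, 0)
  if res.2 = 0 then -1 else res.2

-- ===== PRECONDITION & SPEC =====
def Spec_solution (S : String) (out : Int) : Prop := out = solution_alt S
instance (S : String) (out : Int) : Decidable (Spec_solution S out) := by unfold Spec_solution; infer_instance

-- ===== CLAIM (what is proved, stated in full; the proofs are below) =====
def Claim_equal_solution : Prop := ∀ (S : String), Dom_solution S → Spec_solution S (solution S)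

-- ===== LEMMAS AND PROOFS =====

-- the digram starting at position i (getD-form, matching the ports after cast removal)
def dg (cs : List Char) (i : Nat) : List Char := [cs.getD i ' ', cs.getD (i + 1) ' ']
-- first occurrence position of the digram starting at i
def Fo (cs : List Char) (i : Nat) : Nat := Nat.find (p := fun j => dg cs j = dg cs i) ⟨i, rfl⟩
-- last occurrence position of the digram starting at i
def Lo (cs : List Char) (i : Nat) : Nat := Nat.findGreatest (fun j => dg cs j = dg cs i) (cs.length - 2)
-- max of a list of ints, floored at 0
def imax (l : List Int) : Int := l.foldl max 0
def Aval (cs : List Char) : Int :=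
  imax ((List.range (cs.length - 1)).map (fun i => ((Lo cs i : Int)) - (i : Int)))
def Bval (cs : List Char) : Int :=
  imax ((List.range (cs.length - 1)).map (fun (i : Nat) => ((i : Int)) - (Fo cs i : Int)))

lemma dg_eq (cs : List Char) (i : Nat) (h : i + 1 < cs.length) :
    dg cs i = [cs[i]'(by omega), cs[i + 1]'h] := by
  simp [dg, List.getD, h, (by omega : i < cs.length)]

lemma two_prefix (a b : Char) (l : List Char) :
    [a, b] <+: l ↔ l[0]? = some a ∧ l[1]? = some b := by
  match l with
  | [] => simp
  | [x] => simp [List.cons_prefix_cons]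
  | x :: y :: t => simp [List.prefix_iff_eq_take, eq_comm]

lemma prefix_drop_iff (cs : List Char) (i j : Nat) (hi : i + 1 < cs.length) :
    dg cs i <+: cs.drop j ↔ (j + 1 < cs.length ∧ dg cs j = dg cs i) := by
  rw [dg_eq cs i hi, two_prefix]
  simp only [List.getElem?_drop]
  constructor
  · rintro ⟨h0, h1⟩
    rw [List.getElem?_eq_some_iff] at h0 h1
    obtain ⟨hj0, e0⟩ := h0
    obtain ⟨hj1, e1⟩ := h1
    have hjl : j + 1 < cs.length := by omega
    refine ⟨hjl, ?_⟩
    rw [dg_eq cs j hjl]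
    simp_all
  · rintro ⟨hjl, hdg⟩
    rw [dg_eq cs j hjl] at hdg
    simp only [List.cons.injEq] at hdg
    rw [List.getElem?_eq_some_iff, List.getElem?_eq_some_iff]
    exact ⟨⟨by omega, by simp [hdg.1]⟩, ⟨by omega, by simp [hdg.2.1]⟩⟩

lemma rfind_go_spec (s sub : List Char) (k : Nat) :
    (PySem.Chars.rfind.go s sub k = -1 ∧ ∀ j, j ≤ k → ¬ sub <+: s.drop j) ∨
    (∃ j : Nat, PySem.Chars.rfind.go s sub k = (j : Int) ∧ j ≤ k ∧ sub <+: s.drop j ∧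
      ∀ j', j < j' → j' ≤ k → ¬ sub <+: s.drop j') := by
  induction k with
  | zero =>
    by_cases h : sub.isPrefixOf s
    · right
      exact ⟨0, by simp [PySem.Chars.rfind.go, h], le_refl 0,
        by simpa using List.isPrefixOf_iff_prefix.mp h, by omega⟩
    · left
      refine ⟨by simp [PySem.Chars.rfind.go, h], ?_⟩
      intro j hj
      interval_cases j
      simpa using fun hp => h (List.isPrefixOf_iff_prefix.mpr hp)
  | succ k ih =>
    by_cases h : sub.isPrefixOf (s.drop (k + 1))
    · right
      refine ⟨k + 1, by simp [PySem.Chars.rfind.go, h], le_refl _,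
        List.isPrefixOf_iff_prefix.mp h, by omega⟩
    · have hgo : PySem.Chars.rfind.go s sub (k + 1) = PySem.Chars.rfind.go s sub k := by
        simp [PySem.Chars.rfind.go, h]
      have hnp : ¬ sub <+: s.drop (k + 1) := fun hp => h (List.isPrefixOf_iff_prefix.mpr hp)
      rcases ih with ⟨he, hall⟩ | ⟨j, he, hjk, hp, hmax⟩
      · left
        refine ⟨hgo.trans he, fun j hj hp => ?_⟩
        rcases Nat.lt_or_ge j (k + 1) with h' | h'
        · exact hall j (by omega) hp
        · exact hnp (by rw [show k + 1 = j by omega]; exact hp)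
      · right
        refine ⟨j, hgo.trans he, by omega, hp, fun j' hj' hj'k hp' => ?_⟩
        rcases Nat.lt_or_ge j' (k + 1) with h' | h'
        · exact hmax j' hj' (by omega) hp'
        · exact hnp (by rw [show k + 1 = j' by omega]; exact hp')

lemma dg_Fo (cs : List Char) (i : Nat) : dg cs (Fo cs i) = dg cs i := by
  unfold Fo; exact Nat.find_spec (p := fun j => dg cs j = dg cs i) _

lemma Fo_le (cs : List Char) (i : Nat) : Fo cs i ≤ i := Nat.find_le rfl

lemma Fo_min (cs : List Char) (i j : Nat) (h : dg cs j = dg cs i) : Fo cs i ≤ j := Nat.find_le h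

lemma Fo_congr (cs : List Char) (i j : Nat) (h : dg cs j = dg cs i) : Fo cs j = Fo cs i := by
  refine le_antisymm (Fo_min cs j (Fo cs i) ?_) (Fo_min cs i (Fo cs j) ?_)
  · rw [dg_Fo, h]
  · rw [dg_Fo, h]

lemma dg_Lo (cs : List Char) (i : Nat) (h : i ≤ cs.length - 2) : dg cs (Lo cs i) = dg cs i :=
  Nat.findGreatest_spec (P := fun j => dg cs j = dg cs i) h rfl

lemma le_Lo (cs : List Char) (i : Nat) (h : i ≤ cs.length - 2) : i ≤ Lo cs i :=
  Nat.le_findGreatest (P := fun j => dg cs j = dg cs i) h rfl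

lemma Lo_le (cs : List Char) (i : Nat) : Lo cs i ≤ cs.length - 2 := Nat.findGreatest_le _

lemma Lo_congr (cs : List Char) (i j : Nat) (hj : j ≤ cs.length - 2) (hi : i ≤ cs.length - 2)
    (h : dg cs j = dg cs i) : Lo cs j = Lo cs i := by
  refine le_antisymm (Nat.le_findGreatest (Lo_le cs j) ?_) (Nat.le_findGreatest (Lo_le cs i) ?_)
  · rw [dg_Lo cs j hj, h]
  · rw [dg_Lo cs i hi, ← h]

lemma rfind_eq_Lo (cs : List Char) (i : Nat) (hi : i + 1 < cs.length) :
    PySem.Chars.rfind cs (dg cs i) = (Lo cs i : Int) := by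
  unfold PySem.Chars.rfind
  rcases rfind_go_spec cs (dg cs i) cs.length with ⟨_, hall⟩ | ⟨j, he, hjk, hp, hmax⟩
  · exact absurd ((prefix_drop_iff cs i i hi).mpr ⟨hi, rfl⟩) (hall i (by omega))
  · obtain ⟨hj1, hdgj⟩ := (prefix_drop_iff cs i j hi).mp hp
    have hLoj : Lo cs i = j := by
      refine le_antisymm ?_ (Nat.le_findGreatest (by omega) hdgj)
      by_contra hlt
      rw [not_le] at hlt
      have hLo2 := Lo_le cs i
      have hdgLo : dg cs (Lo cs i) = dg cs i := dg_Lo cs i (by omega)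
      exact hmax (Lo cs i) hlt (by omega)
        ((prefix_drop_iff cs i (Lo cs i) hi).mpr ⟨by omega, hdgLo⟩)
    rw [he, hLoj]

lemma head_filter_range_some (k f : Nat) (p : Nat → Bool)
    (h : ((List.range k).filter p).head? = some f) :
    f < k ∧ p f = true ∧ ∀ j, p j = true → f ≤ j := by
  have hmem : f ∈ (List.range k).filter p := List.mem_of_mem_head? (by rw [h]; rfl)
  have hf := List.mem_filter.mp hmem
  have hfk : f < k := List.mem_range.mp hf.1
  refine ⟨hfk, hf.2, fun j hpj => ?_⟩
  rcases Nat.lt_or_ge j k with hjk | hjk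
  · have hjmem : j ∈ (List.range k).filter p :=
      List.mem_filter.mpr ⟨List.mem_range.mpr hjk, hpj⟩
    have hpw : ((List.range k).filter p).Pairwise (· < ·) :=
      List.pairwise_lt_range.filter p
    obtain ⟨t, ht⟩ := List.head?_eq_some_iff.mp h
    rw [ht] at hjmem hpw
    rcases List.mem_cons.mp hjmem with rfl | hjt
    · exact le_refl _
    · exact le_of_lt (List.rel_of_pairwise_cons hpw hjt)
  · omega

lemma head_filter_range_none (k : Nat) (p : Nat → Bool)
    (h : ((List.range k).filter p).head? = none) : ∀ j, j < k → p j = false := by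
  intro j hj
  have := List.head?_eq_none_iff.mp h
  by_contra hp
  have : j ∈ (List.range k).filter p :=
    List.mem_filter.mpr ⟨List.mem_range.mpr hj, by simpa using hp⟩
  simp_all

lemma foldl_ifmax (l : List Int) (a : Int) :
    l.foldl (fun acc x => if acc < x then x else acc) a = l.foldl max a := by
  induction l generalizing a with
  | nil => rfl
  | cons x t ih =>
    simp only [List.foldl_cons]
    rw [ih]
    congr 1
    rcases lt_or_ge a x with h | h
    · simp [h, max_eq_right (le_of_lt h)]
    · simp [not_lt.mpr h, max_eq_left h]

lemma foldl_max_le (l : List Int) (a c : Int) (ha : a ≤ c) (h : ∀ y ∈ l, y ≤ c) :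
    l.foldl max a ≤ c := by
  induction l generalizing a with
  | nil => exact ha
  | cons x t ih =>
    exact ih _ (max_le ha (h x (List.mem_cons_self))) (fun y hy => h y (List.mem_cons_of_mem _ hy))

lemma imax_append_singleton (l : List Int) (x : Int) : imax (l ++ [x]) = max (imax l) x := by
  simp [imax, List.foldl_append]

lemma slice_eq_dg (cs : List Char) (k : Nat) (h : k + 1 < cs.length) :
    PySem.List.slice cs (some (k : Int)) (some ((k : Int) + 2)) = dg cs k := by
  have : ((k : Int) + 2) = ((k + 2 : Nat) : Int) := by push_cast; ring
  rw [this, PySem.List.slice_natCast, show k + 2 - k = 2 by omega]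
  rw [List.drop_eq_getElem_cons (by omega : k < cs.length),
      List.drop_eq_getElem_cons (h : k + 1 < cs.length)]
  rw [dg_eq cs k h]
  rfl

lemma B_fold_inv (cs : List Char) (k : Nat) (h2 : 2 ≤ cs.length) (hk : k ≤ cs.length - 1) :
    (∀ d : List Char,
      (((List.range k).map (fun (j : Nat) => (j : Int))).foldl (altStep cs) (PySem.Dict.empty, 0)).1.get? d
        = (((List.range k).filter (fun j => decide (dg cs j = d))).head?).map (fun (j : Nat) => (j : Int)))
    ∧ (((List.range k).map (fun (j : Nat) => (j : Int))).foldl (altStep cs) (PySem.Dict.empty, 0)).2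
        = imax ((List.range k).map (fun (i : Nat) => ((i : Int)) - (Fo cs i : Int))) := by
  induction k with
  | zero =>
    exact ⟨fun d => by simp [PySem.Dict.get?_empty], by simp [imax]⟩
  | succ k ih =>
    obtain ⟨ih1, ih2⟩ := ih (by omega)
    have hk1 : k + 1 < cs.length := by omega
    rw [List.range_succ, List.map_append, List.foldl_append, List.map_append]
    simp only [List.map_cons, List.map_nil, List.foldl_cons, List.foldl_nil]
    have hstep : altStep cs (((List.range k).map (fun (j : Nat) => (j : Int))).foldl (altStep cs) (PySem.Dict.empty, 0)) (k : Int)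
        = ((((List.range k).map (fun (j : Nat) => (j : Int))).foldl (altStep cs) (PySem.Dict.empty, 0)).1.setdefault (dg cs k) (k : Int),
           if ((k : Int) - ((((List.range k).map (fun (j : Nat) => (j : Int))).foldl (altStep cs) (PySem.Dict.empty, 0)).1.get? (dg cs k)).getD (k : Int)) > (((List.range k).map (fun (j : Nat) => (j : Int))).foldl (altStep cs) (PySem.Dict.empty, 0)).2
           then ((k : Int) - ((((List.range k).map (fun (j : Nat) => (j : Int))).foldl (altStep cs) (PySem.Dict.empty, 0)).1.get? (dg cs k)).getD (k : Int))
           else (((List.range k).map (fun (j : Nat) => (j : Int))).foldl (altStep cs) (PySem.Dict.empty, 0)).2) := by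
      unfold altStep
      rw [slice_eq_dg cs k hk1]
    rw [hstep]
    have hj : ((((List.range k).map (fun (j : Nat) => (j : Int))).foldl (altStep cs) (PySem.Dict.empty, 0)).1.get? (dg cs k)).getD (k : Int) = ((Fo cs k : Nat) : Int) := by
      rw [ih1 (dg cs k)]
      rcases hh : ((List.range k).filter (fun j => decide (dg cs j = dg cs k))).head? with _ | f
      · have hno := head_filter_range_none _ _ hh
        have hFo : Fo cs k = k := by
          refine le_antisymm (Fo_le cs k) ?_
          by_contra hlt
          rw [not_le] at hlt
          have := hno (Fo cs k) hlt
          rw [decide_eq_false_iff_not] at this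
          exact this (dg_Fo cs k)
        simp [hFo]
      · obtain ⟨hfk, hpf, hmin⟩ := head_filter_range_some _ _ _ hh
        rw [decide_eq_true_eq] at hpf
        have hFo : Fo cs k = f := by
          refine le_antisymm (Fo_min cs k f hpf) ?_
          exact hmin (Fo cs k) (by rw [decide_eq_true_eq]; exact dg_Fo cs k)
        simp [hFo]
    constructor
    · intro d
      rw [List.filter_append]
      by_cases hd : d = dg cs k
      · subst hd
        rw [PySem.Dict.get?_setdefault_self]
        rw [ih1 (dg cs k)]
        rw [List.head?_append]
        simp only [List.filter_cons, List.filter_nil, decide_true, if_true]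
        rcases ((List.range k).filter (fun j => decide (dg cs j = dg cs k))).head? with _ | f
        · simp
        · simp
      · rw [PySem.Dict.get?_setdefault_of_ne _ _ hd]
        rw [ih1 d]
        have hpk : (fun j => decide (dg cs j = d)) k = false := by
          simp only [decide_eq_false_iff_not]
          exact fun h => hd h.symm
        rw [List.head?_append]
        simp only [List.filter_cons, List.filter_nil]
        rw [if_neg (by simp only [hpk]; exact Bool.false_ne_true)]
        simp
    · rw [hj, ih2, imax_append_singleton]
      dsimp only
      rcases lt_or_ge (imax ((List.range k).map (fun (i : Nat) => ((i : Int)) - (Fo cs i : Int)))) ((k : Int) - (Fo cs k : Int)) with hlt | hge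
      · rw [if_pos hlt, max_eq_right (le_of_lt hlt)]
      · rw [if_neg (not_lt.mpr hge), max_eq_left hge]

lemma foldl_ifmax_map {α : Type} (l : List α) (f : α → Int) :
    l.foldl (fun acc x => if acc < f x then f x else acc) 0 = imax (l.map f) := by
  unfold imax
  rw [← foldl_ifmax]
  simp [List.foldl_map]

lemma solution_eq (S : String) (h2 : 2 ≤ S.toList.length) :
    solution S = if Aval S.toList = 0 then -1 else Aval S.toList := by
  unfold solution
  dsimp only
  have hn : ((S.toList.length : Int) - 1) = ((S.toList.length - 1 : Nat) : Int) := by omega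
  rw [hn, PySem.List.pyRange_zero_natCast, List.foldl_map]
  rw [PySem.List.foldl_congr_mem _ _
    (fun (acc : Int) (k : Nat) =>
      if acc < ((Lo S.toList k : Int) - (k : Int)) then ((Lo S.toList k : Int) - (k : Int)) else acc)
    _ ?_]
  · rw [foldl_ifmax_map]
    rfl
  · intro acc k hk
    have hk1 : k + 1 < S.toList.length := by have := List.mem_range.mp hk; omega
    simp only [PySem.List.pyGetD_natCast,
      show ((k : Int) + 1) = ((k + 1 : Nat) : Int) by push_cast; ring]
    rw [show [S.toList.getD k ' ', S.toList.getD (k + 1) ' '] = dg S.toList k from rfl,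
      rfind_eq_Lo S.toList k hk1]

lemma solution_alt_eq (S : String) (h2 : 2 ≤ S.toList.length) :
    solution_alt S = if Bval S.toList = 0 then -1 else Bval S.toList := by
  unfold solution_alt
  dsimp only
  have hn : ((S.toList.length : Int) - 1) = ((S.toList.length - 1 : Nat) : Int) := by omega
  rw [hn, PySem.List.pyRange_zero_natCast]
  rw [(B_fold_inv S.toList (S.toList.length - 1) h2 (le_refl _)).2]
  rfl

lemma imax_nonneg (l : List Int) : 0 ≤ imax l := (PySem.List.le_foldl_max l 0).1

lemma le_imax (l : List Int) (y : Int) (h : y ∈ l) : y ≤ imax l :=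
  (PySem.List.le_foldl_max l 0).2 y h

lemma Aval_eq_Bval (cs : List Char) (h2 : 2 ≤ cs.length) : Aval cs = Bval cs := by
  refine le_antisymm ?_ ?_
  · refine foldl_max_le _ _ _ (imax_nonneg _) ?_
    intro y hy
    obtain ⟨i, hi, rfl⟩ := List.mem_map.mp hy
    have him : i < cs.length - 1 := List.mem_range.mp hi
    have hile : i ≤ cs.length - 2 := by omega
    have hFle := Fo_le cs i
    have hiLo := le_Lo cs i hile
    have hLole := Lo_le cs i
    have hFcongr : Fo cs (Lo cs i) = Fo cs i := Fo_congr cs i (Lo cs i) (dg_Lo cs i hile)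
    have hmem : ((Lo cs i : Int)) - (Fo cs (Lo cs i) : Int)
        ∈ (List.range (cs.length - 1)).map (fun (j : Nat) => ((j : Int)) - (Fo cs j : Int)) :=
      List.mem_map.mpr ⟨Lo cs i, List.mem_range.mpr (by omega), rfl⟩
    have hle := le_imax _ _ hmem
    calc ((Lo cs i : Int)) - (i : Int) ≤ ((Lo cs i : Int)) - (Fo cs (Lo cs i) : Int) := by
          rw [hFcongr]; omega
      _ ≤ Bval cs := hle
  · refine foldl_max_le _ _ _ (imax_nonneg _) ?_
    intro y hy
    obtain ⟨i, hi, rfl⟩ := List.mem_map.mp hy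
    have him : i < cs.length - 1 := List.mem_range.mp hi
    have hile : i ≤ cs.length - 2 := by omega
    have hFle := Fo_le cs i
    have hiLo := le_Lo cs i hile
    have hLcongr : Lo cs (Fo cs i) = Lo cs i :=
      Lo_congr cs i (Fo cs i) (le_trans hFle hile) hile (dg_Fo cs i)
    have hmem : ((Lo cs (Fo cs i) : Int)) - (Fo cs i : Int)
        ∈ (List.range (cs.length - 1)).map (fun (j : Nat) => ((Lo cs j : Int)) - (j : Int)) :=
      List.mem_map.mpr ⟨Fo cs i, List.mem_range.mpr (by omega), rfl⟩
    have hle := le_imax _ _ hmem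
    calc ((i : Int)) - (Fo cs i : Int) ≤ ((Lo cs (Fo cs i) : Int)) - (Fo cs i : Int) := by
          rw [hLcongr]; omega
      _ ≤ Aval cs := hle

lemma small_case (S : String) (h : S.toList.length ≤ 1) :
    solution S = -1 ∧ solution_alt S = -1 := by
  unfold solution solution_alt
  dsimp only
  rcases Nat.le_one_iff_eq_zero_or_eq_one.mp h with h0 | h1
  · rw [h0]
    norm_num
  · rw [h1]
    norm_num

-- ===== VERDICT (by name: the statement is the Claim_ definition above) =====
theorem solution_spec : Claim_equal_solution := by
  intro S _
  unfold Spec_solution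
  by_cases h2 : 2 ≤ S.toList.length
  · rw [solution_eq S h2, solution_alt_eq S h2, Aval_eq_Bval S.toList h2]
  · obtain ⟨hA, hB⟩ := small_case S (by omega)
    rw [hA, hB]
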